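-- pv_equiv track=rewrite | github.com/quantumlib/Cirq | cirq/circuits/ascii_drawer.py | _str_lexi
-- ===== SOURCE A (Python) =====
-- def _str_lexi(value):
--     """0-pads digits in a string to hack int order into lexicographic order."""
--     s = str(value)
--
--     was_on_digits = False
--     last_transition = 0
--     output = []
--
--     def dump(k):
--         chunk = s[last_transition:k]
--         if was_on_digits:
--             chunk = chunk.rjust(8, '0')
--         output.append(chunk)
--
--     for i in range(len(s)):
--         on_digits = s[i].isdigit()
--         if was_on_digits != on_digits:
--             dump(i)
--             was_on_digits = on_digits
--             last_transition = i
--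
--     dump(len(s))
--     return ''.join(output)
-- ===== SOURCE B (Python) =====
-- def _str_lexi(value):
--     """0-pads digits in a string to hack int order into lexicographic order."""
--     s = str(value)
--     out = []
--     i = 0
--     n = len(s)
--     while i < n:
--         d = s[i].isdigit()
--         j = i + 1
--         while j < n and s[j].isdigit() == d:
--             j += 1
--         run = s[i:j]
--         out.append(run.rjust(8, '0') if d else run)
--         i = j
--     return ''.join(out)
-- ===== Notes on version B (the rewrite author's own statement) =====
-- stated objective: simpler
-- what changed: Replaces A's per-character transition state machine (was_on_digits/last_transition flags plus a dump closure mutating an output list) with a loop that slices out each maximal digit/non-digit run in one step and pads digit runs directly.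
import Mathlib
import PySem

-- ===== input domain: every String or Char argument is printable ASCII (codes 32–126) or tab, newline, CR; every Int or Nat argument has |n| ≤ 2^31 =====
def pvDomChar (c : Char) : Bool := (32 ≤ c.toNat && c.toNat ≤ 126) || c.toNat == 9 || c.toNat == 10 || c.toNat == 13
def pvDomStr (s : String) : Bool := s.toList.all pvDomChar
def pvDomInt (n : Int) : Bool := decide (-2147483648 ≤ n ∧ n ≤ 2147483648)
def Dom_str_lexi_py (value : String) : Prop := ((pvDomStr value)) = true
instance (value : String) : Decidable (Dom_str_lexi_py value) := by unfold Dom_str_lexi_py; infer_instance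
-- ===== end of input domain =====

-- B replaces A's per-character transition state machine (was_on_digits/last_transition + dump closure)
-- by a loop that slices out each maximal digit/non-digit run at once and pads it; objective: simpler.

-- shared primitive: hand port of Python's chunk.rjust(8, '0') — exact on these chunks (left-pad with '0' to width 8)
def pvRjust8 (cs : List Char) : List Char := List.replicate (8 - cs.length) '0' ++ cs

-- ===== PORT A =====
-- the nested 'dump' closure of A (captures s, was_on_digits, last_transition, output)
def pvDump (s : List Char) (wasOn : Bool) (lastT k : Nat) (output : List (List Char)) : List (List Char) :=
  let chunk := PySem.List.slice s (some (lastT : Int)) (some (k : Int))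
  let chunk := if wasOn then pvRjust8 chunk else chunk
  output ++ [chunk]

-- the 'for i in range(len(s))' loop of A, followed by the final dump(len(s))
def pvLoopA (s : List Char) (i : Nat) (wasOn : Bool) (lastT : Nat) (output : List (List Char)) :
    List (List Char) :=
  if h : i < s.length then
    let onD := PySem.Chars.isdigit s[i]
    if wasOn != onD then pvLoopA s (i + 1) onD i (pvDump s wasOn lastT i output)
    else pvLoopA s (i + 1) wasOn lastT output
  else pvDump s wasOn lastT s.length output
termination_by s.length - i

def str_lexi_py (value : String) : String :=
  String.ofList (PySem.Chars.join [] (pvLoopA value.toList 0 false 0 []))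

-- ===== PORT B =====
-- the inner 'while j < n and s[j].isdigit() == d: j += 1' of Source B: the first j ≥ i+1 past the run
def pvRunEnd (s : List Char) (i : Nat) (d : Bool) : Nat :=
  i + 1 + ((s.drop (i + 1)).takeWhile (fun c => PySem.Chars.isdigit c == d)).length

-- the outer 'while i < n' loop of Source B
def pvLoopB (s : List Char) (i : Nat) (out : List (List Char)) : List (List Char) :=
  if h : i < s.length then
    let d := PySem.Chars.isdigit s[i]
    let j := pvRunEnd s i d
    let run := PySem.List.slice s (some (i : Int)) (some (j : Int))
    pvLoopB s j (out ++ [if d then pvRjust8 run else run])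
  else out
termination_by s.length - i
decreasing_by simp [pvRunEnd]; omega

def str_lexi_py_alt (value : String) : String :=
  String.ofList (PySem.Chars.join [] (pvLoopB value.toList 0 []))

-- ===== PRECONDITION & SPEC =====
def Spec_str_lexi_py (value : String) (out : String) : Prop := out = str_lexi_py_alt value
instance (value : String) (out : String) : Decidable (Spec_str_lexi_py value out) := by unfold Spec_str_lexi_py; infer_instance

-- ===== CLAIM (what is proved, stated in full; the proofs are below) =====
def Claim_equal_str_lexi_py : Prop := ∀ (value : String), Dom_str_lexi_py value → Spec_str_lexi_py value (str_lexi_py value)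

-- ===== LEMMAS AND PROOFS =====

-- proof-side helpers: the maximal-run decomposition of a string, padding of one run,
-- and the end index of A's current run when scanning from position i in class d
def pvRuns : List Char → List (List Char)
  | [] => []
  | c :: t =>
    (c :: t.takeWhile (fun x => PySem.Chars.isdigit x == PySem.Chars.isdigit c)) ::
      pvRuns (t.dropWhile (fun x => PySem.Chars.isdigit x == PySem.Chars.isdigit c))
termination_by l => l.length
decreasing_by exact Nat.lt_succ_of_le (List.Sublist.length_le (List.dropWhile_sublist _))

def pvPad (r : List Char) : List Char :=
  match r with
  | [] => []
  | c :: _ => if PySem.Chars.isdigit c then pvRjust8 r else r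

def pvKA (s : List Char) (i : Nat) (d : Bool) : Nat :=
  i + ((s.drop i).takeWhile (fun c => PySem.Chars.isdigit c == d)).length

theorem pvJoinNil (l : List (List Char)) : PySem.Chars.join [] l = l.flatten := by
  induction l with
  | nil => rfl
  | cons a l ih =>
    cases l with
    | nil => simp [PySem.Chars.join, List.intercalate]
    | cons b m =>
      rw [PySem.Chars.join, List.intercalate] at ih ⊢
      rw [List.intersperse_cons₂, List.flatten_cons, List.flatten_cons, List.nil_append, ih]
      simp

theorem pvTakeDropWhile (p : Char → Bool) (l : List Char) :
    l.take (l.takeWhile p).length = l.takeWhile p ∧ l.drop (l.takeWhile p).length = l.dropWhile p := by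
  have hsplit : l = l.takeWhile p ++ l.dropWhile p := List.takeWhile_append_dropWhile.symm
  constructor
  · nth_rewrite 2 [hsplit]; exact List.take_left
  · nth_rewrite 2 [hsplit]; exact List.drop_left

-- everything about the one maximal run starting at position i
theorem pvRunStep (s : List Char) (i : Nat) (h : i < s.length) :
    PySem.List.slice s (some (i : Int)) (some ((pvRunEnd s i (PySem.Chars.isdigit s[i])) : Int))
        = s[i] :: (s.drop (i + 1)).takeWhile (fun c => PySem.Chars.isdigit c == PySem.Chars.isdigit s[i])
    ∧ s.drop (pvRunEnd s i (PySem.Chars.isdigit s[i]))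
        = (s.drop (i + 1)).dropWhile (fun c => PySem.Chars.isdigit c == PySem.Chars.isdigit s[i])
    ∧ pvRunEnd s i (PySem.Chars.isdigit s[i]) ≤ s.length
    ∧ pvRuns (s.drop i)
        = (s[i] :: (s.drop (i + 1)).takeWhile (fun c => PySem.Chars.isdigit c == PySem.Chars.isdigit s[i])) ::
            pvRuns ((s.drop (i + 1)).dropWhile (fun c => PySem.Chars.isdigit c == PySem.Chars.isdigit s[i])) := by
  set p := fun c => PySem.Chars.isdigit c == PySem.Chars.isdigit s[i] with hp
  set t := s.drop (i + 1) with ht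
  have hdrop : s.drop i = s[i] :: t := List.drop_eq_getElem_cons h
  have htw : (t.takeWhile p).length ≤ t.length := (List.takeWhile_sublist p).length_le
  have hlen : t.length = s.length - (i + 1) := by rw [ht]; simp
  have hk : pvRunEnd s i (PySem.Chars.isdigit s[i]) = i + 1 + (t.takeWhile p).length := rfl
  obtain ⟨htake, hdropw⟩ := pvTakeDropWhile p t
  refine ⟨?_, ?_, ?_, ?_⟩
  · rw [hk, PySem.List.slice_natCast]
    have h1 : i + 1 + (t.takeWhile p).length - i = (t.takeWhile p).length + 1 := by omega
    rw [h1, hdrop, List.take_succ_cons, htake]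
  · rw [hk, ← hdropw, ht, List.drop_drop]
  · rw [hk]; omega
  · rw [hdrop, pvRuns]

-- pvKA: A's current run, scanned from i in class d, ends where Source B's run does
theorem pvKA_stop (s : List Char) (i : Nat) (d : Bool) (h : i < s.length)
    (hpd : (PySem.Chars.isdigit s[i] == d) = false) : pvKA s i d = i := by
  rw [pvKA, List.drop_eq_getElem_cons h, List.takeWhile_cons, hpd]
  simp

theorem pvKA_step (s : List Char) (i : Nat) (d : Bool) (h : i < s.length)
    (hpd : (PySem.Chars.isdigit s[i] == d) = true) : pvKA s i d = pvKA s (i + 1) d := by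
  rw [pvKA, pvKA, List.drop_eq_getElem_cons h, List.takeWhile_cons, hpd]
  simp
  omega

theorem pvKA_runEnd (s : List Char) (i : Nat) (h : i < s.length) :
    pvKA s (i + 1) (PySem.Chars.isdigit s[i]) = pvRunEnd s i (PySem.Chars.isdigit s[i]) := by
  rw [pvKA, pvRunEnd]

-- the A loop, continued from index i inside a run of class d that started at lt,
-- emits the rest of that run and then the padded maximal runs of the remainder
theorem pvLoopA_eq (s : List Char) (i : Nat) (d : Bool) (lt : Nat) (out : List (List Char)) :
    i ≤ s.length →
    pvLoopA s i d lt out =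
      out ++
        (if d then pvRjust8 (PySem.List.slice s (some (lt : Int)) (some ((pvKA s i d : Nat) : Int)))
         else PySem.List.slice s (some (lt : Int)) (some ((pvKA s i d : Nat) : Int))) ::
          (pvRuns (s.drop (pvKA s i d))).map pvPad := by
  induction i, d, lt, out using pvLoopA.induct s with
  | case1 i wasOn lastT output h onD hne ih =>
    have honD : onD = PySem.Chars.isdigit s[i] := rfl
    rw [honD] at hne ih
    intro hi
    have hpd : (PySem.Chars.isdigit s[i] == wasOn) = false := by
      cases hw : wasOn <;> cases hd : PySem.Chars.isdigit s[i] <;> simp_all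
    obtain ⟨hslice, hdk, hkle, hruns⟩ := pvRunStep s i h
    rw [pvLoopA, dif_pos h, if_pos hne, ih (by omega), pvKA_runEnd s i h,
      pvKA_stop s i wasOn h hpd, hdk, hruns, hslice, pvDump]
    simp [pvPad]
  | case2 i wasOn lastT output h onD hne ih =>
    have honD : onD = PySem.Chars.isdigit s[i] := rfl
    rw [honD] at hne
    intro hi
    have hpd : (PySem.Chars.isdigit s[i] == wasOn) = true := by
      cases hw : wasOn <;> cases hd : PySem.Chars.isdigit s[i] <;> simp_all
    rw [pvLoopA, dif_pos h, if_neg hne, ih (by omega), pvKA_step s i wasOn h hpd]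
  | case3 i wasOn lastT output h =>
    intro hi
    have hil : i = s.length := by omega
    subst hil
    rw [pvLoopA, dif_neg h, pvDump]
    have hka : pvKA s s.length wasOn = s.length := by
      rw [pvKA]; simp
    rw [hka]
    simp [pvRuns]

-- the B loop, from index i, appends exactly the padded maximal runs of s.drop i
theorem pvLoopB_eq (s : List Char) (i : Nat) (out : List (List Char)) :
    i ≤ s.length → pvLoopB s i out = out ++ (pvRuns (s.drop i)).map pvPad := by
  induction i, out using pvLoopB.induct s with
  | case1 i out h d j run ih =>
    intro hi
    have hd : d = PySem.Chars.isdigit s[i] := rfl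
    have hj : j = pvRunEnd s i (PySem.Chars.isdigit s[i]) := by rw [← hd]
    have hrun : run = PySem.List.slice s (some (i : Int)) (some (j : Int)) := rfl
    obtain ⟨hslice, hdk, hkle, hruns⟩ := pvRunStep s i h
    simp only [dite_eq_ite] at ih
    rw [hrun, hj, hd] at ih
    rw [pvLoopB, dif_pos h]
    simp only []
    rw [ih hkle, hdk, hslice, hruns]
    simp [pvPad]
  | case2 i out h =>
    intro hi
    have hil : i = s.length := by omega
    subst hil
    rw [pvLoopB, dif_neg h]
    simp [pvRuns]

-- ===== VERDICT (by name: the statement is the Claim_ definition above) =====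
theorem str_lexi_py_spec : Claim_equal_str_lexi_py := by
  intro value _
  unfold Spec_str_lexi_py str_lexi_py str_lexi_py_alt
  rw [pvLoopA_eq value.toList 0 false 0 [] (by omega), pvLoopB_eq value.toList 0 [] (by omega)]
  rw [pvJoinNil, pvJoinNil]
  congr 1
  simp only [List.nil_append, List.drop_zero, Bool.false_eq_true, if_false, List.flatten_cons]
  cases hcase : value.toList with
  | nil =>
    have h0 : pvKA ([] : List Char) 0 false = 0 := by rw [pvKA]; simp
    rw [h0]
    simp [PySem.List.slice]
  | cons c t =>
    cases hd : PySem.Chars.isdigit c with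
    | true =>
      have h0 : pvKA (c :: t) 0 false = 0 := by
        rw [pvKA]; simp [hd]
      rw [h0, show ((0 : Nat) : Int) = ((0 : Nat) : Int) from rfl]
      rw [PySem.List.slice_natCast]
      simp
    | false =>
      have h0c : (0 : Nat) < (c :: t).length := by simp
      have hg : (c :: t)[0] = c := rfl
      have hd0 : PySem.Chars.isdigit (c :: t)[0] = false := by rw [hg, hd]
      have h0 : pvKA (c :: t) 0 false = pvRunEnd (c :: t) 0 (PySem.Chars.isdigit (c :: t)[0]) := by
        rw [← hd0, pvKA_step (c :: t) 0 _ h0c (by rw [hd0]; rfl), pvKA_runEnd (c :: t) 0 h0c]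
      obtain ⟨hslice, hdk, hkle, hruns⟩ := pvRunStep (c :: t) 0 h0c
      rw [List.drop_zero] at hruns
      rw [h0, hslice, hdk, hruns]
      simp [pvPad, hg, hd]
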